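-- pv_equiv track=rewrite | github.com/jl293/tribopy | app.py | parse_docstring
-- ===== SOURCE A (Python) =====
-- def parse_docstring(docstring):
--     """Parse the docstring to extract parameter names and descriptions."""
--     lines = docstring.strip().split('\n')
--     param_info = {}
--     instructions = []
--
--     # Check if the first non-empty line is the dashed line
--     first_line_is_dashes = True
--     for line in lines:
--         stripped_line = line.strip()
--         if stripped_line == "----------------------------------------------------------------------------------------------------":
--             if first_line_is_dashes:
--                 continue  # Skip this line only if it's the first non-empty line
--         else:
--             first_line_is_dashes = False  # After seeing a valid line, set this to False
--
--         if stripped_line == "":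
--             continue
--         if ':' in stripped_line:
--             param_name, description = stripped_line.split(':', 1)
--             param_info[param_name.strip()] = description.strip()
--         else:
--             instructions.append(stripped_line)
--
--     return instructions, param_info
-- ===== SOURCE B (Python) =====
-- DASHES = "-" * 100
--
--
-- def parse_docstring(docstring):
--     """Parse the docstring to extract parameter names and descriptions."""
--     lines = [l.strip() for l in docstring.strip().split('\n')]
--     while lines and lines[0] == DASHES:
--         lines = lines[1:]
--     content = [l for l in lines if l]
--     instructions = [l for l in content if ':' not in l]
--     param_info = {k.strip(): v.strip()
--                   for k, v in (l.split(':', 1) for l in content if ':' in l)}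
--     return instructions, param_info
-- ===== Notes on version B (the rewrite author's own statement) =====
-- stated objective: idiomatic
-- what changed: Replaces A's single classifying loop with shared mutable state (first_line_is_dashes flag, two accumulators) by staged passes: strip all lines, drop the leading dash prefix, filter out blanks once, then build instructions and param_info by two independent comprehensions (lines without ':' vs. a dict comprehension over the split of lines with ':').
import Mathlib
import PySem

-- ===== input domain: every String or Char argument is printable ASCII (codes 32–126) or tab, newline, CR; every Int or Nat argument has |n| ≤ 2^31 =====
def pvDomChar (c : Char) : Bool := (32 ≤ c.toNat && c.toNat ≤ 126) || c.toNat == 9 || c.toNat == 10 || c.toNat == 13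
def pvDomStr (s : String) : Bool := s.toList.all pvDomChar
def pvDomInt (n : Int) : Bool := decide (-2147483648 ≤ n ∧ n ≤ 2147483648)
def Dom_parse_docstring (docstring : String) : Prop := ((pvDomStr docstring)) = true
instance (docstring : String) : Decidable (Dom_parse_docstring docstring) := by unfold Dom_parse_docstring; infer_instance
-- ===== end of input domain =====

-- B replaces A's single flagged classification loop by staged passes: strip all lines, drop the leading
-- dash prefix, drop blanks, then build instructions and param_info by two independent filtered passes
-- (more idiomatic decomposition; same result, no speed claim).

def pvDashLine : String := "----------------------------------------------------------------------------------------------------"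

-- ===== PORT A =====
-- one iteration of A's loop; state = (param_info, instructions, first_line_is_dashes)
def pvStepA (st : PySem.Dict String String × List String × Bool) (line : String) :
    PySem.Dict String String × List String × Bool :=
  let s := PySem.Str.strip line
  if s == pvDashLine && st.2.2 then st      -- continue: skip only while the flag is set
  else
    let flag := if s == pvDashLine then st.2.2 else false
    if s == "" then (st.1, st.2.1, flag)
    else if PySem.Str.isIn ":" s then
      match PySem.Str.splitMax? s ":" 1 with
      | some (name :: desc :: _) =>
          (st.1.insert (PySem.Str.strip name) (PySem.Str.strip desc), st.2.1, flag)
      | _ => (st.1, st.2.1, flag)           -- unreachable: ':' is in s, so the split has two parts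
    else (st.1, st.2.1 ++ [s], flag)

def parse_docstring (docstring : String) : List String × (List (String × String)) :=
  let lines := (PySem.Str.split? (PySem.Str.strip docstring) "\n").getD []   -- sep "\n" ≠ "": never none
  let st := lines.foldl pvStepA (PySem.Dict.empty, [], true)
  (st.2.1, st.1.items)

-- ===== PORT B =====
-- the while-loop dropping the leading all-dash lines
def pvSkipDashes : List String → List String
  | [] => []
  | l :: rest => if l == pvDashLine then pvSkipDashes rest else l :: rest

-- l.split(':', 1) unpacked into the pair (k, v); the default is unreachable for lines containing ':'
def pvSplitKV (l : String) : String × String :=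
  match PySem.Str.splitMax? l ":" 1 with
  | some (k :: v :: _) => (k, v)
  | _ => (l, "")

def parse_docstring_alt (docstring : String) : List String × (List (String × String)) :=
  let lines := ((PySem.Str.split? (PySem.Str.strip docstring) "\n").getD []).map PySem.Str.strip
  let content := (pvSkipDashes lines).filter (fun l => !(l == ""))
  let instructions := content.filter (fun l => !(PySem.Str.isIn ":" l))
  let param_info := ((content.filter (fun l => PySem.Str.isIn ":" l)).map pvSplitKV).foldl
      (fun d kv => d.insert (PySem.Str.strip kv.1) (PySem.Str.strip kv.2)) PySem.Dict.empty
  (instructions, param_info.items)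

-- ===== PRECONDITION & SPEC =====
def Spec_parse_docstring (docstring : String) (out : List String × (List (String × String))) : Prop := out = parse_docstring_alt docstring
instance (docstring : String) (out : List String × (List (String × String))) : Decidable (Spec_parse_docstring docstring out) := by unfold Spec_parse_docstring; infer_instance

-- ===== CLAIM (what is proved, stated in full; the proofs are below) =====
def Claim_equal_parse_docstring : Prop := ∀ (docstring : String), Dom_parse_docstring docstring → Spec_parse_docstring docstring (parse_docstring docstring)

-- ===== LEMMAS AND PROOFS =====

-- proof-side intermediate form of the classification: one uniform step over an already-stripped line
def pvStepB (st : List String × PySem.Dict String String) (line : String) :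
    List String × PySem.Dict String String :=
  if line == "" then st
  else
    match PySem.Str.splitMax? line ":" 1 with
    | some [a, b] => (st.1, st.2.insert (PySem.Str.strip a) (PySem.Str.strip b))
    | some _ => (st.1 ++ [line], st.2)
    | none => st                            -- unreachable: sep ":" is nonempty

-- split(':', 1) characterised: one piece when ':' is absent, the two pieces around the first ':' otherwise.
theorem pvGoZero (sep : List Char) (fuel : Nat) (l cur : List Char) (acc : List (List Char)) :
    PySem.Chars.splitOnMax.go sep fuel 0 l cur acc = ((cur.reverse ++ l) :: acc).reverse := by
  cases fuel with
  | zero => rfl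
  | succ f => cases l with
    | nil => simp [PySem.Chars.splitOnMax.go]
    | cons c rest => simp [PySem.Chars.splitOnMax.go]

theorem pvGoOne (l : List Char) : ∀ (fuel : Nat) (cur : List Char) (acc : List (List Char)),
    l.length < fuel →
    PySem.Chars.splitOnMax.go [':'] fuel 1 l cur acc =
      if ':' ∈ l then
        acc.reverse ++ [cur.reverse ++ l.takeWhile (· ≠ ':'), (l.dropWhile (· ≠ ':')).tail]
      else acc.reverse ++ [cur.reverse ++ l] := by
  induction l with
  | nil =>
    intro fuel cur acc h
    cases fuel with
    | zero => omega
    | succ f => simp [PySem.Chars.splitOnMax.go]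
  | cons c rest ih =>
    intro fuel cur acc h
    cases fuel with
    | zero => omega
    | succ f =>
      by_cases hc : c = ':'
      · subst hc
        simp [PySem.Chars.splitOnMax.go, List.isPrefixOf, pvGoZero]
      · have hp : List.isPrefixOf [':'] (c :: rest) = false := by
          simp [List.isPrefixOf]
          exact fun h' => hc h'.symm
        simp only [PySem.Chars.splitOnMax.go, hp]
        rw [ih f (c :: cur) acc (by simpa using Nat.lt_of_succ_lt_succ h)]
        by_cases hm : ':' ∈ rest
        · simp [hm, hc, Ne.symm hc]
        · simp [hm, Ne.symm hc]

theorem pvSplitColon (s : List Char) :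
    PySem.Chars.splitOnMax s [':'] 1 =
      if ':' ∈ s then [s.takeWhile (· ≠ ':'), (s.dropWhile (· ≠ ':')).tail] else [s] := by
  unfold PySem.Chars.splitOnMax
  rw [if_neg (by omega : ¬ (1 : Int) < 0)]
  rw [(by rfl : (1 : Int).toNat = 1), pvGoOne s (s.length + 1) [] [] (by omega)]
  by_cases hm : ':' ∈ s <;> simp [hm]

theorem pvSplitColonStr (s : String) :
    PySem.Str.splitMax? s ":" 1 =
      if PySem.Str.isIn ":" s then
        some [String.ofList (s.toList.takeWhile (· ≠ ':')),
              String.ofList ((s.toList.dropWhile (· ≠ ':')).tail)]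
      else some [String.ofList s.toList] := by
  have hmem : PySem.Str.isIn ":" s = true ↔ ':' ∈ s.toList := by
    rw [PySem.Str.isIn, PySem.Chars.isIn_iff_infix]
    exact List.singleton_infix_iff ':' s.toList
  rw [PySem.Str.splitMax?, PySem.Chars.splitMax?]
  rw [if_neg (by decide : ¬ (":".toList.isEmpty = true))]
  rw [(by rfl : (":".toList) = [':']), pvSplitColon]
  by_cases hm : ':' ∈ s.toList
  · rw [if_pos hm, if_pos (hmem.mpr hm)]; rfl
  · rw [if_neg hm, if_neg (fun h => hm (hmem.mp h))]; rfl

-- once the flag is false, A's step is the uniform step on the stripped line (flag stays false)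
theorem pvStepA_false (pi : PySem.Dict String String) (ins : List String) (line : String) :
    pvStepA (pi, ins, false) line =
      ((pvStepB (ins, pi) (PySem.Str.strip line)).2, (pvStepB (ins, pi) (PySem.Str.strip line)).1, false) := by
  simp only [pvStepA, pvStepB]
  rw [pvSplitColonStr (PySem.Str.strip line)]
  by_cases hd : PySem.Str.strip line == pvDashLine <;>
    by_cases he : PySem.Str.strip line == "" <;>
      by_cases hc : PySem.Chars.isIn [':'] (PySem.Chars.strip line.toList) = true <;>
        simp [hd, he, hc]

-- while the flag is still set, a non-dash line is classified by the uniform step, and clears the flag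
theorem pvStepA_true_nondash (pi : PySem.Dict String String) (ins : List String) (line : String)
    (hd : (PySem.Str.strip line == pvDashLine) = false) :
    pvStepA (pi, ins, true) line =
      ((pvStepB (ins, pi) (PySem.Str.strip line)).2, (pvStepB (ins, pi) (PySem.Str.strip line)).1, false) := by
  simp only [pvStepA, pvStepB]
  rw [pvSplitColonStr (PySem.Str.strip line)]
  by_cases he : PySem.Str.strip line == "" <;>
    by_cases hc : PySem.Chars.isIn [':'] (PySem.Chars.strip line.toList) = true <;>
      simp [hd, he, hc]

theorem pvFoldA_false (ls : List String) : ∀ (pi : PySem.Dict String String) (ins : List String),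
    ls.foldl pvStepA (pi, ins, false) =
      (((ls.map PySem.Str.strip).foldl pvStepB (ins, pi)).2,
       ((ls.map PySem.Str.strip).foldl pvStepB (ins, pi)).1, false) := by
  induction ls with
  | nil => intro pi ins; rfl
  | cons l rest ih =>
    intro pi ins
    rw [List.map_cons, List.foldl_cons, List.foldl_cons, pvStepA_false]
    exact ih _ _

theorem pvFoldA_true (ls : List String) : ∀ (pi : PySem.Dict String String) (ins : List String),
    ((ls.foldl pvStepA (pi, ins, true)).2.1, (ls.foldl pvStepA (pi, ins, true)).1) =
      (pvSkipDashes (ls.map PySem.Str.strip)).foldl pvStepB (ins, pi) := by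
  induction ls with
  | nil => intro pi ins; rfl
  | cons l rest ih =>
    intro pi ins
    by_cases hd : PySem.Str.strip l == pvDashLine
    · have hA : pvStepA (pi, ins, true) l = (pi, ins, true) := by
        unfold pvStepA; simp [hd]
      rw [List.map_cons, List.foldl_cons, hA, pvSkipDashes, if_pos hd]
      exact ih pi ins
    · rw [List.map_cons, List.foldl_cons, pvStepA_true_nondash pi ins l (by simpa using hd),
          pvSkipDashes, if_neg hd, List.foldl_cons, pvFoldA_false]

-- the uniform classification fold equals B's staged filtered passes
theorem pvFoldB_split (ls : List String) : ∀ (ins : List String) (pi : PySem.Dict String String),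
    ls.foldl pvStepB (ins, pi) =
      (ins ++ ((ls.filter (fun l => !(l == ""))).filter (fun l => !(PySem.Str.isIn ":" l))),
       ((((ls.filter (fun l => !(l == ""))).filter (fun l => PySem.Str.isIn ":" l)).map pvSplitKV).foldl
          (fun d kv => d.insert (PySem.Str.strip kv.1) (PySem.Str.strip kv.2)) pi)) := by
  induction ls with
  | nil => intro ins pi; simp
  | cons l rest ih =>
    intro ins pi
    rw [List.foldl_cons]
    by_cases he : l == ""
    · have : pvStepB (ins, pi) l = (ins, pi) := by unfold pvStepB; simp [he]
      rw [this, ih]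
      simp [he]
    · by_cases hc : PySem.Str.isIn ":" l
      · have hs := pvSplitColonStr l
        rw [if_pos hc] at hs
        have hB : pvStepB (ins, pi) l =
            (ins, pi.insert (PySem.Str.strip (String.ofList (l.toList.takeWhile (· ≠ ':'))))
                            (PySem.Str.strip (String.ofList ((l.toList.dropWhile (· ≠ ':')).tail)))) := by
          unfold pvStepB; rw [if_neg (by simpa using he), hs]
        have hKV : pvSplitKV l = (String.ofList (l.toList.takeWhile (· ≠ ':')),
                                  String.ofList ((l.toList.dropWhile (· ≠ ':')).tail)) := by
          unfold pvSplitKV; rw [hs]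
        have hc' : PySem.Chars.isIn [':'] l.toList = true := by simpa [PySem.Str.isIn] using hc
        rw [hB, ih]
        simp [he, hc', hKV]
      · have hs := pvSplitColonStr l
        rw [if_neg (by simpa using hc)] at hs
        have hB : pvStepB (ins, pi) l = (ins ++ [l], pi) := by
          unfold pvStepB
          rw [if_neg (by simpa using he), hs]
        have hc' : PySem.Chars.isIn [':'] l.toList = false := by simpa [PySem.Str.isIn] using hc
        rw [hB, ih]
        simp [he, hc']
  
-- ===== VERDICT (by name: the statement is the Claim_ definition above) =====
theorem parse_docstring_spec : Claim_equal_parse_docstring := by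
  intro docstring _
  unfold Spec_parse_docstring
  simp only [parse_docstring, parse_docstring_alt]
  have h := pvFoldA_true ((PySem.Str.split? (PySem.Str.strip docstring) "\n").getD []) PySem.Dict.empty []
  rw [pvFoldB_split, Prod.mk.injEq] at h
  obtain ⟨h1, h2⟩ := h
  rw [h1, h2]
  simp
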